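-- pv_equiv track=rewrite | github.com/ECLLM/ECLLM | trigger_output.py | partition_extraction
-- ===== SOURCE A (Python) =====
-- def partition_extraction(logprob_list):
--     result = []
--     start_index = None
--     for i, num in enumerate(logprob_list):
--         if num != 0 and start_index is None:
--             start_index = i
--         elif num == 0 and start_index is not None:
--             result.append(logprob_list[start_index:i])
--             start_index = None
--     if start_index is not None:
--         result.append(logprob_list[start_index:])
--
--
--     return result
-- ===== SOURCE B (Python) =====
-- def partition_extraction(logprob_list):
--     result = []
--     run = []
--     for num in logprob_list:
--         if num != 0:
--             run.append(num)
--         elif run: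
--             result.append(run)
--             run = []
--     if run:
--         result.append(run)
--     return result
-- ===== Notes on version B (the rewrite author's own statement) =====
-- stated objective: simpler
-- what changed: Replaces the start_index/slicing state machine with a current-run buffer that collects nonzero elements directly and is flushed on each zero and at the end.
import Mathlib
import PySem

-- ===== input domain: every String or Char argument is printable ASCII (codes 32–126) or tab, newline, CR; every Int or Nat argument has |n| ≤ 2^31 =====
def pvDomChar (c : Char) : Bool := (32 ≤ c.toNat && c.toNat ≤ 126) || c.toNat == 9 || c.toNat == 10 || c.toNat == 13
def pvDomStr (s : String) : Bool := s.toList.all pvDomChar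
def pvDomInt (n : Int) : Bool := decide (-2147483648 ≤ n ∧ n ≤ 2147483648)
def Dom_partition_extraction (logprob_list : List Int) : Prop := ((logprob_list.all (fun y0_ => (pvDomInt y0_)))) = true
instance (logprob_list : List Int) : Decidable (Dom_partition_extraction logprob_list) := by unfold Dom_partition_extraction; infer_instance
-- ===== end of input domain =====

-- B replaces A's start_index/slicing state machine with a current-run buffer flushed on zeros and at the end (simpler; same O(n) cost).

-- ===== PORT A =====
-- loop body of A: state (result, start_index), item (i, num)
def paStep (orig : List Int) (st : List (List Int) × Option Int) (p : Int × Int) : List (List Int) × Option Int :=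
  if p.2 ≠ 0 ∧ st.2.isNone then (st.1, some p.1)
  else if p.2 = 0 ∧ st.2.isSome then
    (st.1 ++ [PySem.List.slice orig (some (st.2.getD 0)) (some p.1)], none)
  else st

def partition_extraction (logprob_list : List Int) : List (List Int) :=
  let st := (PySem.List.enumerate logprob_list 0).foldl (paStep logprob_list) ([], none)
  match st.2 with
  | some s => st.1 ++ [PySem.List.slice logprob_list (some s) none]
  | none => st.1

-- ===== PORT B =====
-- loop body of B: state (result, run)
def pbStep (st : List (List Int) × List Int) (num : Int) : List (List Int) × List Int :=
  if num ≠ 0 then (st.1, st.2 ++ [num])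
  else if st.2 ≠ [] then (st.1 ++ [st.2], [])
  else st

def partition_extraction_alt (logprob_list : List Int) : List (List Int) :=
  let st := logprob_list.foldl pbStep ([], [])
  if st.2 ≠ [] then st.1 ++ [st.2] else st.1

-- ===== PRECONDITION & SPEC =====
def Spec_partition_extraction (logprob_list : List Int) (out : List (List Int)) : Prop := out = partition_extraction_alt logprob_list
instance (logprob_list : List Int) (out : List (List Int)) : Decidable (Spec_partition_extraction logprob_list out) := by unfold Spec_partition_extraction; infer_instance

-- ===== CLAIM (what is proved, stated in full; the proofs are below) =====
def Claim_equal_partition_extraction : Prop := ∀ (logprob_list : List Int), Dom_partition_extraction logprob_list → Spec_partition_extraction logprob_list (partition_extraction logprob_list)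

-- ===== LEMMAS AND PROOFS =====

-- finalization of A's loop state (uses the original list for the trailing slice)
def finA (orig : List Int) (st : List (List Int) × Option Int) : List (List Int) :=
  match st.2 with
  | some s => st.1 ++ [PySem.List.slice orig (some s) none]
  | none => st.1

-- finalization of B's loop state
def finB (st : List (List Int) × List Int) : List (List Int) :=
  if st.2 ≠ [] then st.1 ++ [st.2] else st.1

-- relation between A's start_index and B's run buffer after processing the first i elements
def RunInv (orig : List Int) (i : Nat) (si : Option Int) (run : List Int) : Prop :=
  match si with
  | none => run = []
  | some s => ∃ sn : Nat, s = (sn : Int) ∧ sn ≤ i ∧ run = (orig.drop sn).take (i - sn) ∧ run ≠ []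

lemma loop_eq (orig : List Int) : ∀ (ys : List Int) (i : Nat) (res : List (List Int))
    (si : Option Int) (run : List Int),
    orig.drop i = ys → RunInv orig i si run →
    finA orig ((PySem.List.enumerate ys (i : Int)).foldl (paStep orig) (res, si))
      = finB (ys.foldl pbStep (res, run)) := by
  intro ys
  induction ys with
  | nil =>
    intro i res si run hdrop hinv
    simp only [PySem.List.enumerate_nil, List.foldl_nil]
    match si, hinv with
    | none, hinv =>
      have hrun0 : run = [] := hinv
      simp [finA, finB, hrun0]
    | some s, ⟨sn, hs, hle, hrun, hne⟩ =>
      have hlen : orig.length ≤ i := by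
        have := congrArg List.length hdrop
        simp at this; omega
      have hfull : (orig.drop sn).take (i - sn) = orig.drop sn := by
        apply List.take_of_length_le
        rw [List.length_drop]; omega
      have hsn : sn < orig.length := by
        by_contra hcon
        have hnil : orig.drop sn = [] := List.drop_eq_nil_of_le (by omega)
        simp [hrun, hnil] at hne
      simp [finA, finB, hs, hrun, PySem.List.slice_from_natCast, hfull, hsn]
  | cons y rest ih =>
    intro i res si run hdrop hinv
    have hget : orig[i]? = some y := by
      have h0 : (orig.drop i)[0]? = orig[i + 0]? := List.getElem?_drop
      simpa [hdrop] using h0.symm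
    have hdrop' : orig.drop (i + 1) = rest := by
      have : orig.drop (i + 1) = (orig.drop i).tail := by
        rw [← List.drop_drop]; simp [hdrop]
      simpa [hdrop] using this
    have hcast : ((i : Int) + 1) = ((i + 1 : Nat) : Int) := by push_cast; ring
    rw [PySem.List.enumerate_cons, List.foldl_cons, List.foldl_cons, hcast]
    by_cases hy : y = 0
    · match si, hinv with
      | none, hinv =>
        have hA : paStep orig (res, none) ((i : Int), y) = (res, none) := by
          simp [paStep, hy]
        have hrun0 : run = [] := hinv
        have hB : pbStep (res, run) y = (res, run) := by
          simp [pbStep, hy, hrun0]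
        rw [hA, hB]
        exact ih (i + 1) res none run hdrop' hinv
      | some s, ⟨sn, hs, hle, hrun, hne⟩ =>
        have hA : paStep orig (res, some s) ((i : Int), y)
            = (res ++ [PySem.List.slice orig (some s) (some (i : Int))], none) := by
          simp [paStep, hy]
        have hB : pbStep (res, run) y = (res ++ [run], []) := by
          simp [pbStep, hy, hne]
        have hslice : PySem.List.slice orig (some s) (some (i : Int)) = run := by
          rw [hs, PySem.List.slice_natCast, hrun]
        rw [hA, hB, hslice]
        exact ih (i + 1) (res ++ [run]) none [] hdrop' rfl
    · match si, hinv with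
      | none, hinv =>
        have hA : paStep orig (res, none) ((i : Int), y) = (res, some (i : Int)) := by
          simp [paStep, hy]
        have hB : pbStep (res, run) y = (res, run ++ [y]) := by
          simp [pbStep, hy]
        have hrun0 : run = [] := hinv
        rw [hA, hB]
        refine ih (i + 1) res (some (i : Int)) (run ++ [y]) hdrop' ?_
        refine ⟨i, rfl, by omega, ?_, by simp⟩
        have h1 : i + 1 - i = 1 := by omega
        rw [h1, hdrop, hrun0]
        rfl
      | some s, ⟨sn, hs, hle, hrun, hne⟩ =>
        have hA : paStep orig (res, some s) ((i : Int), y) = (res, some s) := by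
          simp [paStep, hy]
        have hB : pbStep (res, run) y = (res, run ++ [y]) := by
          simp [pbStep, hy]
        rw [hA, hB]
        refine ih (i + 1) res (some s) (run ++ [y]) hdrop' ?_
        refine ⟨sn, hs, by omega, ?_, by simp⟩
        have hidx : (orig.drop sn)[i - sn]? = some y := by
          have h1 : (orig.drop sn)[i - sn]? = orig[sn + (i - sn)]? := List.getElem?_drop
          have h2 : sn + (i - sn) = i := by omega
          rw [h1, h2, hget]
        have : i + 1 - sn = (i - sn) + 1 := by omega
        rw [this, List.take_add_one, hidx, hrun]
        rfl

-- ===== VERDICT (by name: the statement is the Claim_ definition above) =====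
theorem partition_extraction_spec : Claim_equal_partition_extraction := by
  intro xs _
  show partition_extraction xs = partition_extraction_alt xs
  have h := loop_eq xs xs 0 [] none [] (by simp) rfl
  simpa [partition_extraction, partition_extraction_alt, finA, finB] using h
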